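-- pv_equiv track=rewrite | github.com/pavelveter/hh-bot | bot/utils/search/search_format.py | create_pagination_keyboard
-- ===== SOURCE A (Python) =====
-- def create_pagination_keyboard(query: str, page: int, total_pages: int) -> list[list[dict[str, str]]]:
--     """Create inline keyboard for pagination with page numbers and ellipsis."""
--     keyboard = []
--     buttons = []
--
--     # Previous
--     if page > 0:
--         buttons.append({"text": "◀️", "callback_data": f"search_page:{query}:{page - 1}"})
--
--     current_page_num = page + 1
--
--     if total_pages <= 7:
--         for p in range(1, total_pages + 1):
--             text = f"• {p} •" if p == current_page_num else str(p)
--             buttons.append({"text": text, "callback_data": f"search_page:{query}:{p - 1}"})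
--     else:
--         start_page = max(2, current_page_num - 1)
--         end_page = min(total_pages - 1, current_page_num + 1)
--
--         buttons.append({"text": ("• 1 •" if current_page_num == 1 else "1"), "callback_data": f"search_page:{query}:0"})
--         if start_page > 2:
--             buttons.append({"text": "...", "callback_data": "noop"})
--
--         for p in range(start_page, end_page + 1):
--             if p in {1, total_pages}:
--                 continue
--             text = f"• {p} •" if p == current_page_num else str(p)
--             buttons.append({"text": text, "callback_data": f"search_page:{query}:{p - 1}"})
--
--         if end_page < total_pages - 1:
--             buttons.append({"text": "...", "callback_data": "noop"})
--
--         if total_pages > 1: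
--             text = f"• {total_pages} •" if current_page_num == total_pages else str(total_pages)
--             buttons.append({"text": text, "callback_data": f"search_page:{query}:{total_pages - 1}"})
--
--     if page < total_pages - 1:
--         buttons.append({"text": "▶️", "callback_data": f"search_page:{query}:{page + 1}"})
--
--     if buttons:
--         keyboard.append(buttons)
--
--     return keyboard
-- ===== SOURCE B (Python) =====
-- def create_pagination_keyboard(query: str, page: int, total_pages: int) -> list[list[dict[str, str]]]:
--     """Pagination keyboard from a sorted visible-page set: ellipses are inserted
--     wherever two consecutive visible pages leave a gap."""
--     cur = page + 1
--     if total_pages <= 7: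
--         visible = list(range(1, total_pages + 1))
--     else:
--         visible = sorted({1, total_pages} | {p for p in (cur - 1, cur, cur + 1)
--                                              if 2 <= p <= total_pages - 1})
--     buttons = []
--     if page > 0:
--         buttons.append({"text": "◀️", "callback_data": f"search_page:{query}:{page - 1}"})
--     prev = None
--     for p in visible:
--         if prev is not None and p - prev > 1:
--             buttons.append({"text": "...", "callback_data": "noop"})
--         label = f"• {p} •" if p == cur else str(p)
--         buttons.append({"text": label, "callback_data": f"search_page:{query}:{p - 1}"})
--         prev = p
--     if page < total_pages - 1:
--         buttons.append({"text": "▶️", "callback_data": f"search_page:{query}:{page + 1}"})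
--     return [buttons] if buttons else []
-- ===== Notes on version B (the rewrite author's own statement) =====
-- stated objective: alternative
-- what changed: B computes the set of visible pages ({1, total_pages} plus the in-range neighbours of the current page), sorts it, and renders it in one gap-detecting pass that inserts an ellipsis whenever two consecutive visible pages differ by more than 1, replacing A's explicit window bounds and hand-placed ellipsis guards.
import Mathlib
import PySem

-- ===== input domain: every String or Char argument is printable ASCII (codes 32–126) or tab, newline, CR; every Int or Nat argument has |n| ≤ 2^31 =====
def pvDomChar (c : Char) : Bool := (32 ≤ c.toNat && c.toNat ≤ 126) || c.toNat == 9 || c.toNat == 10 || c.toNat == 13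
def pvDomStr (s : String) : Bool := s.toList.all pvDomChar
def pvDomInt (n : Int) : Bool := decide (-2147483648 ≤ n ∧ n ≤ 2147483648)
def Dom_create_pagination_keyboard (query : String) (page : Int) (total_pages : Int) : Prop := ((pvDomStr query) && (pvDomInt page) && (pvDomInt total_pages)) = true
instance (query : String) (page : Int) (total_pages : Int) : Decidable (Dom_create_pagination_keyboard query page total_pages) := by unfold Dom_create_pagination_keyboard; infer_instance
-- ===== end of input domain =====

-- B derives the row from a sorted visible-page set, inserting an ellipsis wherever two
-- consecutive visible pages leave a gap; a different decomposition, same cost.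

-- ===== PORT A =====
def create_pagination_keyboard (query : String) (page : Int) (total_pages : Int) : List (List (List (String × String))) :=
  let buttons : List (List (String × String)) := []
  let buttons := if page > 0 then
      buttons ++ [[("text", "◀️"), ("callback_data", "search_page:" ++ query ++ ":" ++ PySem.Int.toStr (page - 1))]]
    else buttons
  let cur := page + 1
  let buttons :=
    if total_pages ≤ 7 then
      (PySem.List.pyRange 1 (total_pages + 1) 1).foldl (fun bs p =>
        bs ++ [[("text", if p == cur then "• " ++ PySem.Int.toStr p ++ " •" else PySem.Int.toStr p),
                ("callback_data", "search_page:" ++ query ++ ":" ++ PySem.Int.toStr (p - 1))]]) buttons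
    else
      let start_page := max 2 (cur - 1)
      let end_page := min (total_pages - 1) (cur + 1)
      let buttons := buttons ++ [[("text", if cur == 1 then "• 1 •" else "1"),
                                  ("callback_data", "search_page:" ++ query ++ ":0")]]
      let buttons := if start_page > 2 then buttons ++ [[("text", "..."), ("callback_data", "noop")]] else buttons
      let buttons := (PySem.List.pyRange start_page (end_page + 1) 1).foldl (fun bs p =>
        if p == 1 || p == total_pages then bs
        else bs ++ [[("text", if p == cur then "• " ++ PySem.Int.toStr p ++ " •" else PySem.Int.toStr p),
                     ("callback_data", "search_page:" ++ query ++ ":" ++ PySem.Int.toStr (p - 1))]]) buttons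
      let buttons := if end_page < total_pages - 1 then buttons ++ [[("text", "..."), ("callback_data", "noop")]] else buttons
      if total_pages > 1 then
        buttons ++ [[("text", if cur == total_pages then "• " ++ PySem.Int.toStr total_pages ++ " •" else PySem.Int.toStr total_pages),
                     ("callback_data", "search_page:" ++ query ++ ":" ++ PySem.Int.toStr (total_pages - 1))]]
      else buttons
  let buttons := if page < total_pages - 1 then
      buttons ++ [[("text", "▶️"), ("callback_data", "search_page:" ++ query ++ ":" ++ PySem.Int.toStr (page + 1))]]
    else buttons
  if buttons ≠ [] then [buttons] else []

-- ===== PORT B =====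
-- B-side helpers: the loop body of B's single rendering pass
def pvBtn (query : String) (cur : Int) (p : Int) : List (String × String) :=
  [("text", if p == cur then "• " ++ PySem.Int.toStr p ++ " •" else PySem.Int.toStr p),
   ("callback_data", "search_page:" ++ query ++ ":" ++ PySem.Int.toStr (p - 1))]

def pvEll : List (String × String) := [("text", "..."), ("callback_data", "noop")]

def pvStep (query : String) (cur : Int) (st : List (List (String × String)) × Option Int) (p : Int) :
    List (List (String × String)) × Option Int :=
  let bs := match st.2 with
    | some q => if p - q > 1 then st.1 ++ [pvEll] else st.1
    | none => st.1
  (bs ++ [pvBtn query cur p], some p)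

def create_pagination_keyboard_alt (query : String) (page : Int) (total_pages : Int) : List (List (List (String × String))) :=
  let cur := page + 1
  let visible : List Int :=
    if total_pages ≤ 7 then PySem.List.pyRange 1 (total_pages + 1) 1
    else
      -- sorted({1, total_pages} | {p for p in (cur-1, cur, cur+1) if 2 <= p <= total_pages-1})
      PySem.List.sorted
        (PySem.Set.union (PySem.Set.ofList [1, total_pages])
          (PySem.Set.ofList ([cur - 1, cur, cur + 1].filter (fun p => decide (2 ≤ p ∧ p ≤ total_pages - 1)))))
        (fun x => x) false
  let buttons : List (List (String × String)) :=
    if page > 0 then [[("text", "◀️"), ("callback_data", "search_page:" ++ query ++ ":" ++ PySem.Int.toStr (page - 1))]]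
    else []
  let st := visible.foldl (pvStep query cur) (buttons, none)
  let buttons := st.1
  let buttons := if page < total_pages - 1 then
      buttons ++ [[("text", "▶️"), ("callback_data", "search_page:" ++ query ++ ":" ++ PySem.Int.toStr (page + 1))]]
    else buttons
  if buttons ≠ [] then [buttons] else []

-- ===== PRECONDITION & SPEC =====
def Spec_create_pagination_keyboard (query : String) (page : Int) (total_pages : Int) (out : List (List (List (String × String)))) : Prop := out = create_pagination_keyboard_alt query page total_pages
instance (query : String) (page : Int) (total_pages : Int) (out : List (List (List (String × String)))) : Decidable (Spec_create_pagination_keyboard query page total_pages out) := by unfold Spec_create_pagination_keyboard; infer_instance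

-- ===== CLAIM (what is proved, stated in full; the proofs are below) =====
def Claim_equal_create_pagination_keyboard : Prop := ∀ (query : String) (page : Int) (total_pages : Int), Dom_create_pagination_keyboard query page total_pages → Spec_create_pagination_keyboard query page total_pages (create_pagination_keyboard query page total_pages)

-- ===== LEMMAS AND PROOFS =====

theorem beq_symm_int (a b : Int) : (a == b) = (b == a) := by
  by_cases h : a = b
  · subst h; rfl
  · simp [h, Ne.symm h]

theorem gapfold (query : String) (cur : Int) :
    ∀ (n : Nat) (a b pr : Int) (bs : List (List (String × String))), (b - a).toNat = n →
    (PySem.List.pyRange a b 1).foldl (pvStep query cur) (bs, some pr) =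
      ((if a < b then (if a - pr > 1 then bs ++ [pvEll] else bs) ++ (PySem.List.pyRange a b 1).map (pvBtn query cur) else bs),
       some (if a < b then b - 1 else pr)) := by
  intro n
  induction n with
  | zero =>
    intro a b pr bs h
    have hba : b ≤ a := by omega
    rw [PySem.List.pyRange_one_eq_nil hba]
    simp [show ¬ a < b by omega]
  | succ n ih =>
    intro a b pr bs h
    have hab : a < b := by omega
    rw [PySem.List.pyRange_one_cons hab]
    simp only [List.foldl_cons, List.map_cons]
    have hstep : pvStep query cur (bs, some pr) a =
        ((if a - pr > 1 then bs ++ [pvEll] else bs) ++ [pvBtn query cur a], some a) := by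
      simp [pvStep]
    rw [hstep, ih (a+1) b a _ (by omega)]
    by_cases h2 : a + 1 < b
    · have hng : ¬ (a + 1 - a > 1) := by omega
      simp [h2, hab]
    · have hb : b = a + 1 := by omega
      subst hb
      simp [hab, PySem.List.pyRange_one_eq_nil (le_refl (a+1))]

theorem range1' (a b : Int) (h : b = a + 1) : PySem.List.pyRange a b 1 = [a] := by
  subst h; exact PySem.List.pyRange_one_singleton a

theorem range2' (a b : Int) (h : b = a + 2) : PySem.List.pyRange a b 1 = [a, a + 1] := by
  subst h
  rw [PySem.List.pyRange_one_cons (by omega)]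
  rw [show a + 2 = (a + 1) + 1 by ring, PySem.List.pyRange_one_singleton]

theorem range3' (a b : Int) (h : b = a + 3) : PySem.List.pyRange a b 1 = [a, a + 1, a + 2] := by
  subst h
  rw [PySem.List.pyRange_one_cons (by omega)]
  rw [show a + 3 = (a + 1) + 2 by ring, range2' _ _ rfl]
  simp only [List.cons.injEq, and_true, true_and]
  omega

theorem filter_eq_range (cur tp : Int) (h7 : 7 < tp) :
    [cur - 1, cur, cur + 1].filter (fun p => decide (2 ≤ p ∧ p ≤ tp - 1))
      = PySem.List.pyRange (max 2 (cur - 1)) (min (tp - 1) (cur + 1) + 1) 1 := by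
  simp only [List.filter_cons, List.filter_nil, decide_eq_true_eq]
  by_cases hA : cur ≤ 0
  · rw [if_neg (by omega), if_neg (by omega), if_neg (by omega),
      PySem.List.pyRange_one_eq_nil (by omega)]
  by_cases hB : cur = 1
  · rw [if_neg (by omega), if_neg (by omega), if_pos (by omega),
      show max 2 (cur - 1) = 2 by omega, range1' _ _ (by omega)]
    simp only [List.cons.injEq, and_true]
    omega
  by_cases hC : cur = 2
  · rw [if_neg (by omega), if_pos (by omega), if_pos (by omega),
      show max 2 (cur - 1) = 2 by omega, range2' _ _ (by omega)]
    simp only [List.cons.injEq, and_true, true_and]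
    omega
  by_cases hD : cur ≤ tp - 2
  · rw [if_pos (by omega), if_pos (by omega), if_pos (by omega),
      show max 2 (cur - 1) = cur - 1 by omega, range3' _ _ (by omega)]
    simp only [List.cons.injEq, and_true, true_and]
    omega
  by_cases hE : cur = tp - 1
  · rw [if_pos (by omega), if_pos (by omega), if_neg (by omega),
      show max 2 (cur - 1) = cur - 1 by omega, range2' _ _ (by omega)]
    simp only [List.cons.injEq, and_true, true_and]
    omega
  by_cases hF : cur = tp
  · rw [if_pos (by omega), if_neg (by omega), if_neg (by omega),
      show max 2 (cur - 1) = cur - 1 by omega, range1' _ _ (by omega)]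
  · rw [if_neg (by omega), if_neg (by omega), if_neg (by omega),
      PySem.List.pyRange_one_eq_nil (by omega)]

theorem visible_eq (tp : Int) (W : List Int)
    (hW : W.Pairwise (· < ·)) (hlo : ∀ w ∈ W, 1 < w) (hhi : ∀ w ∈ W, w < tp) (htp : 1 < tp) :
    PySem.List.sorted (PySem.Set.union (PySem.Set.ofList [1, tp]) (PySem.Set.ofList W)) (fun x => x) false
      = 1 :: (W ++ [tp]) := by
  have hWnd : W.Nodup := hW.imp (fun h => ne_of_lt h)
  have hofW : PySem.Set.ofList W = W := PySem.Set.ofList_eq_self_of_nodup W hWnd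
  have hof1 : PySem.Set.ofList [1, tp] = [1, tp] := by
    apply PySem.Set.ofList_eq_self_of_nodup
    simp [List.nodup_cons]
    omega
  have hunion : PySem.Set.union (PySem.Set.ofList [1, tp]) (PySem.Set.ofList W) = [1, tp] ++ W := by
    rw [hof1, hofW]
    show PySem.Set.update [1, tp] W = [1, tp] ++ W
    apply PySem.Set.update_eq_append_of_disjoint _ _ hWnd
    intro x hx
    have := hlo x hx; have := hhi x hx
    simp
    omega
  rw [hunion]
  apply PySem.List.sorted_eq_of_perm_of_pairwise_lt
  · exact List.Perm.cons 1 (List.perm_append_singleton tp W)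
  · refine List.pairwise_cons.mpr ⟨?_, ?_⟩
    · intro x hx
      rcases List.mem_append.mp hx with h | h
      · exact hlo x h
      · simp at h; omega
    · refine List.pairwise_append.mpr ⟨hW, by simp, ?_⟩
      intro x hx y hy
      simp at hy; subst hy
      exact hhi x hx

theorem pvStep_some (query : String) (cur : Int) (bs : List (List (String × String))) (pr p : Int) :
    pvStep query cur (bs, some pr) p
      = ((if p - pr > 1 then bs ++ [pvEll] else bs) ++ [pvBtn query cur p], some p) := by
  simp [pvStep]

theorem main_equiv (query : String) (page : Int) (total_pages : Int) :
    create_pagination_keyboard query page total_pages = create_pagination_keyboard_alt query page total_pages := by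
  unfold create_pagination_keyboard create_pagination_keyboard_alt
  by_cases h7 : total_pages ≤ 7
  · by_cases h0 : total_pages ≤ 0
    · rw [PySem.List.pyRange_one_eq_nil (by omega : total_pages + 1 ≤ 1)]
      by_cases hp : page > 0 <;> by_cases hn : page < total_pages - 1 <;> simp [h7, hp, hn]
    · have hng : ¬ ((2 : Int) - 1 > 1) := by omega
      have hcons : PySem.List.pyRange 1 (total_pages + 1) 1 = 1 :: PySem.List.pyRange 2 (total_pages + 1) 1 := by
        rw [PySem.List.pyRange_one_cons (by omega)]; norm_num
      simp only [h7, if_true, hcons, List.foldl_cons,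
        PySem.List.foldl_append_singleton_eq_map]
      rw [show pvStep query (page + 1) ((if page > 0 then [[("text", "◀️"), ("callback_data", "search_page:" ++ query ++ ":" ++ PySem.Int.toStr (page - 1))]] else []), none) 1
          = ((if page > 0 then [[("text", "◀️"), ("callback_data", "search_page:" ++ query ++ ":" ++ PySem.Int.toStr (page - 1))]] else []) ++ [pvBtn query (page + 1) 1], some 1) from by simp [pvStep]]
      rw [gapfold query (page + 1) (total_pages + 1 - 2).toNat 2 (total_pages + 1) 1 _ rfl]
      by_cases h1 : (2:Int) < total_pages + 1
      · rw [if_pos h1, if_neg hng]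
        by_cases hp : page > 0 <;> by_cases hn : page < total_pages - 1 <;>
          simp [hp, hn, pvBtn, List.append_assoc]
      · have h1' : total_pages + 1 ≤ 2 := Int.not_lt.mp h1
        rw [if_neg h1, PySem.List.pyRange_one_eq_nil h1']
        by_cases hp : page > 0 <;> by_cases hn : page < total_pages - 1 <;>
          simp [hp, hn, pvBtn, List.append_assoc]
  · have h7' : (7:Int) < total_pages := by omega
    have htp1 : total_pages > 1 := by omega
    have hfold : ∀ (init : List (List (String × String))),
        (PySem.List.pyRange (max 2 (page + 1 - 1)) (min (total_pages - 1) (page + 1 + 1) + 1) 1).foldl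
          (fun bs p =>
            if p == 1 || p == total_pages then bs
            else bs ++ [[("text", if p == page + 1 then "• " ++ PySem.Int.toStr p ++ " •" else PySem.Int.toStr p),
                         ("callback_data", "search_page:" ++ query ++ ":" ++ PySem.Int.toStr (p - 1))]]) init
        = init ++ (PySem.List.pyRange (max 2 (page + 1 - 1)) (min (total_pages - 1) (page + 1 + 1) + 1) 1).map
            (pvBtn query (page + 1)) := by
      intro init
      rw [PySem.List.foldl_congr_mem (g := fun bs p => bs ++ [pvBtn query (page + 1) p])]
      · exact PySem.List.foldl_append_singleton_eq_map _ _ _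
      · intro acc x hx
        rw [PySem.List.mem_pyRange_one] at hx
        have h1 : ¬ (x == 1 || x == total_pages) = true := by
          simp only [Bool.or_eq_true, beq_iff_eq]
          omega
        simp [h1, pvBtn]
    have hW : (PySem.List.pyRange (max 2 (page + 1 - 1)) (min (total_pages - 1) (page + 1 + 1) + 1) 1).Pairwise (· < ·) :=
      PySem.List.pairwise_lt_pyRange_one _ _
    have hlo : ∀ w ∈ PySem.List.pyRange (max 2 (page + 1 - 1)) (min (total_pages - 1) (page + 1 + 1) + 1) 1, 1 < w := by
      intro w hw
      rw [PySem.List.mem_pyRange_one] at hw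
      omega
    have hhi : ∀ w ∈ PySem.List.pyRange (max 2 (page + 1 - 1)) (min (total_pages - 1) (page + 1 + 1) + 1) 1, w < total_pages := by
      intro w hw
      rw [PySem.List.mem_pyRange_one] at hw
      omega
    simp only [h7, if_false, hfold]
    rw [filter_eq_range (page + 1) total_pages h7']
    rw [visible_eq total_pages _ hW hlo hhi (by omega)]
    simp only [List.foldl_cons, List.foldl_append, List.foldl_nil]
    rw [show pvStep query (page + 1) ((if page > 0 then [[("text", "◀️"), ("callback_data", "search_page:" ++ query ++ ":" ++ PySem.Int.toStr (page - 1))]] else []), none) 1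
        = ((if page > 0 then [[("text", "◀️"), ("callback_data", "search_page:" ++ query ++ ":" ++ PySem.Int.toStr (page - 1))]] else []) ++ [pvBtn query (page + 1) 1], some 1) from by simp [pvStep]]
    rw [gapfold query (page + 1) ((min (total_pages - 1) (page + 1 + 1) + 1) - (max 2 (page + 1 - 1))).toNat
        (max 2 (page + 1 - 1)) (min (total_pages - 1) (page + 1 + 1) + 1) 1 _ rfl]
    by_cases hw : (max 2 (page + 1 - 1)) < (min (total_pages - 1) (page + 1 + 1) + 1)
    · rw [if_pos hw, if_pos hw, pvStep_some, if_pos htp1]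
      by_cases hl : max 2 (page + 1 - 1) > 2
      · rw [if_pos hl, if_pos (show max 2 (page + 1 - 1) - 1 > 1 from by omega)]
        by_cases ht : min (total_pages - 1) (page + 1 + 1) < total_pages - 1
        · rw [if_pos ht, if_pos (show total_pages - (min (total_pages - 1) (page + 1 + 1) + 1 - 1) > 1 from by omega)]
          by_cases hp : page > 0 <;> by_cases hn : page < total_pages - 1 <;>
            simp [hp, hn, pvBtn, pvEll,
              beq_symm_int 1 (page + 1), beq_symm_int total_pages (page + 1),
              show ∀ s : String, s ++ ":" ++ PySem.Int.toStr 0 = s ++ ":0" from fun s => by rw [String.append_assoc]; rfl,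
              show ("• " ++ PySem.Int.toStr 1 ++ " •" : String) = "• 1 •" from rfl,
              show PySem.Int.toStr 1 = "1" from rfl,
              List.append_assoc]
        · rw [if_neg ht, if_neg (show ¬ (total_pages - (min (total_pages - 1) (page + 1 + 1) + 1 - 1) > 1) from by omega)]
          by_cases hp : page > 0 <;> by_cases hn : page < total_pages - 1 <;>
            simp [hp, hn, pvBtn, pvEll,
              beq_symm_int 1 (page + 1), beq_symm_int total_pages (page + 1),
              show ∀ s : String, s ++ ":" ++ PySem.Int.toStr 0 = s ++ ":0" from fun s => by rw [String.append_assoc]; rfl,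
              show ("• " ++ PySem.Int.toStr 1 ++ " •" : String) = "• 1 •" from rfl,
              show PySem.Int.toStr 1 = "1" from rfl,
              List.append_assoc]
      · rw [if_neg hl, if_neg (show ¬ (max 2 (page + 1 - 1) - 1 > 1) from by omega)]
        by_cases ht : min (total_pages - 1) (page + 1 + 1) < total_pages - 1
        · rw [if_pos ht, if_pos (show total_pages - (min (total_pages - 1) (page + 1 + 1) + 1 - 1) > 1 from by omega)]
          by_cases hp : page > 0 <;> by_cases hn : page < total_pages - 1 <;>
            simp [hp, hn, pvBtn, pvEll,
              beq_symm_int 1 (page + 1), beq_symm_int total_pages (page + 1),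
              show ∀ s : String, s ++ ":" ++ PySem.Int.toStr 0 = s ++ ":0" from fun s => by rw [String.append_assoc]; rfl,
              show ("• " ++ PySem.Int.toStr 1 ++ " •" : String) = "• 1 •" from rfl,
              show PySem.Int.toStr 1 = "1" from rfl,
              List.append_assoc]
        · rw [if_neg ht, if_neg (show ¬ (total_pages - (min (total_pages - 1) (page + 1 + 1) + 1 - 1) > 1) from by omega)]
          by_cases hp : page > 0 <;> by_cases hn : page < total_pages - 1 <;>
            simp [hp, hn, pvBtn, pvEll,
              beq_symm_int 1 (page + 1), beq_symm_int total_pages (page + 1),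
              show ∀ s : String, s ++ ":" ++ PySem.Int.toStr 0 = s ++ ":0" from fun s => by rw [String.append_assoc]; rfl,
              show ("• " ++ PySem.Int.toStr 1 ++ " •" : String) = "• 1 •" from rfl,
              show PySem.Int.toStr 1 = "1" from rfl,
              List.append_assoc]
    · rw [if_neg hw, if_neg hw]
      have hWnil : PySem.List.pyRange (max 2 (page + 1 - 1)) (min (total_pages - 1) (page + 1 + 1) + 1) 1 = [] :=
        PySem.List.pyRange_one_eq_nil (Int.not_lt.mp hw)
      rw [hWnil, pvStep_some, if_pos htp1, if_pos (show total_pages - 1 > 1 from by omega)]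
      have hw' := Int.not_lt.mp hw
      by_cases hl : max 2 (page + 1 - 1) > 2
      · rw [if_pos hl, if_neg (show ¬ (min (total_pages - 1) (page + 1 + 1) < total_pages - 1) from by omega)]
        by_cases hp : page > 0 <;> by_cases hn : page < total_pages - 1 <;>
          simp [hp, hn, pvBtn, pvEll,
            beq_symm_int 1 (page + 1), beq_symm_int total_pages (page + 1),
            show ∀ s : String, s ++ ":" ++ PySem.Int.toStr 0 = s ++ ":0" from fun s => by rw [String.append_assoc]; rfl,
            show ("• " ++ PySem.Int.toStr 1 ++ " •" : String) = "• 1 •" from rfl,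
            show PySem.Int.toStr 1 = "1" from rfl,
            List.append_assoc]
      · rw [if_neg hl, if_pos (show min (total_pages - 1) (page + 1 + 1) < total_pages - 1 from by omega)]
        by_cases hp : page > 0 <;> by_cases hn : page < total_pages - 1 <;>
          simp [hp, hn, pvBtn, pvEll,
            beq_symm_int 1 (page + 1), beq_symm_int total_pages (page + 1),
            show ∀ s : String, s ++ ":" ++ PySem.Int.toStr 0 = s ++ ":0" from fun s => by rw [String.append_assoc]; rfl,
            show ("• " ++ PySem.Int.toStr 1 ++ " •" : String) = "• 1 •" from rfl,
            show PySem.Int.toStr 1 = "1" from rfl,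
            List.append_assoc]

-- ===== VERDICT (by name: the statement is the Claim_ definition above) =====
theorem create_pagination_keyboard_spec : Claim_equal_create_pagination_keyboard := by
  intro q p tp _
  unfold Spec_create_pagination_keyboard
  exact main_equiv q p tp
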